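-- pv_equiv track=rewrite | github.com/Hydrosat/fusion-hub-examples | FH_Hydrosat.py | unpack_qa_value
-- ===== SOURCE A (Python) =====
-- qa_dict = {
--     'Prepared High-Resolution t0': {'position': 0, 'value': 1},
--     'Prepared High-Resolution t1': {'position': 1, 'value': 1},
--     'Prepared Low-Resolution t0': {'position': 2, 'value': 1},
--     'Prepared Low-Resolution t1': {'position': 3, 'value': 1},
--     'Sharpened High-Resolution t0': {'position': 4, 'value': 1},
--     'Sharpened High-Resolution t1': {'position': 5, 'value': 1},
--     'Sharpened Low-Resolution t0': {'position': 6, 'value': 1},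
--     'Sharpened Low-Resolution t1': {'position': 7, 'value': 1},
--     'Fused t1': {'position': 8, 'value': 1}
-- }
--
-- def unpack_qa_value(qa_val=0):
--
--     bit_desc_full = []
--     # if it is valued 0, it is a clear pixel
--     if qa_val == 0:
--         bit_desc_full.append('valid pixel in all inputs')
--
--     else:
--         # get the bit string for the current qa value
--         bit_str = format(int(qa_val), '#010b')
--         bit_vals = bit_str.split('b')[1]
--
--         bit_desc = []
--         for pos,b in enumerate(bit_vals[::-1]):
--
--             if b=='1':
--                 for k,v in qa_dict.items():
--                     if v['position'] == pos:
--                         bit_desc.append(k)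
--
--         bit_desc_full = bit_desc
--
--     return bit_desc_full
-- ===== SOURCE B (Python) =====
-- def unpack_qa_value(qa_val=0):
--     if qa_val == 0:
--         return ['valid pixel in all inputs']
--     q = int(qa_val)
--     out = []
--     for pos in range(9):
--         if (q >> pos) % 2:
--             if pos == 8:
--                 out.append('Fused t1')
--             else:
--                 proc = 'Prepared' if pos < 4 else 'Sharpened'
--                 res = 'High' if pos % 4 < 2 else 'Low'
--                 out.append('{} {}-Resolution t{}'.format(proc, res, pos % 2))
--     return out
-- ===== Notes on version B (the rewrite author's own statement) =====
-- stated objective: alternative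
-- what changed: Drops the qa_dict table and A's format('#010b') binary-string/split/reversal machinery with its per-set-bit inner dict scan; B loops pos over range(9), tests bit pos arithmetically with (q >> pos) % 2 and synthesises each label directly from the position (Prepared/Sharpened, High/Low, t0/t1).
-- intended difference: On negative qa_val A decodes the bits of the sign-stripped magnitude (A(-128) = ['Sharpened Low-Resolution t1']) while B reads the two's-complement bits as Python's >> defines them (B(-128) adds 'Fused t1'); negative values lie outside the QA bit-flag domain and B's is the standard reading of a negative integer's bits. — e.g. on unpack_qa_value(-128): A returns ["Sharpened Low-Resolution t1"], B returns ["Sharpened Low-Resolution t1", "Fused t1"]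
import Mathlib
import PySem

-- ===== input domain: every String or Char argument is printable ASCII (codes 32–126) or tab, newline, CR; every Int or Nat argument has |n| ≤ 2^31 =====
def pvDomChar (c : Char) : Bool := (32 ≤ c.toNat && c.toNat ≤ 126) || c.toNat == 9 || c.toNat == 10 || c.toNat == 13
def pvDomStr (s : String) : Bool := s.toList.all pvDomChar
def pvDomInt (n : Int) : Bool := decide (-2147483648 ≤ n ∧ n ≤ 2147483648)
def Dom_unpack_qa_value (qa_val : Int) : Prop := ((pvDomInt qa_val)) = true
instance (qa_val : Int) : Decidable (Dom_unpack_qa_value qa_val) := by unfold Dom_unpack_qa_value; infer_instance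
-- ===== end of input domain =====

-- B drops A's qa_dict table, format/#010b binary-string building, string reversal and per-bit inner
-- dict scan: it loops pos over range(9), tests bit pos arithmetically and SYNTHESISES the label from
-- its position (objective: alternative); A = B proved outside D_ (negative qa_val).

-- ===== PORT A =====
-- qa_dict: dict of dicts, insertion order
def qa_dict : List (String × PySem.Dict String Int) :=
  [("Prepared High-Resolution t0", PySem.Dict.ofList [("position", 0), ("value", 1)]),
   ("Prepared High-Resolution t1", PySem.Dict.ofList [("position", 1), ("value", 1)]),
   ("Prepared Low-Resolution t0",  PySem.Dict.ofList [("position", 2), ("value", 1)]),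
   ("Prepared Low-Resolution t1",  PySem.Dict.ofList [("position", 3), ("value", 1)]),
   ("Sharpened High-Resolution t0", PySem.Dict.ofList [("position", 4), ("value", 1)]),
   ("Sharpened High-Resolution t1", PySem.Dict.ofList [("position", 5), ("value", 1)]),
   ("Sharpened Low-Resolution t0", PySem.Dict.ofList [("position", 6), ("value", 1)]),
   ("Sharpened Low-Resolution t1", PySem.Dict.ofList [("position", 7), ("value", 1)]),
   ("Fused t1", PySem.Dict.ofList [("position", 8), ("value", 1)])]

-- v['position'] (the key is present in every entry, so getD is exact here)
def posOf (v : PySem.Dict String Int) : Int := PySem.Dict.getD v "position" 0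

-- binary digits of a natural number, least-significant first ([] for 0); hand port of the digit
-- part of format(·, 'b') (exact: Python's binary digits read MSB-first are (natBin n).reverse)
def natBin : Nat → List Char
  | 0 => []
  | n+1 => (if (n+1) % 2 = 1 then '1' else '0') :: natBin ((n+1)/2)
decreasing_by exact Nat.div_lt_self (Nat.succ_pos n) (by omega)

-- the inner 'for k,v in qa_dict.items(): if v['position'] == pos: bit_desc.append(k)'
def scanStep (pos : Int) (acc : List String) : List String :=
  qa_dict.foldl (fun acc2 kv => if posOf kv.2 == pos then acc2 ++ [kv.1] else acc2) acc

def unpack_qa_value (qa_val : Int) : List String :=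
  if qa_val == 0 then ["valid pixel in all inputs"]
  else
    -- bit_str = format(int(qa_val), '#010b'): sign, then "0b", then digits zero-padded to total width 10
    -- bit_vals = bit_str.split('b')[1] = the padding plus the digits (hand port of format/split, exact)
    let digits : List Char := (natBin qa_val.natAbs).reverse
    let signLen : Nat := if qa_val < 0 then 1 else 0
    let bit_vals : List Char := List.replicate (10 - (signLen + 2 + digits.length)) '0' ++ digits
    -- for pos, b in enumerate(bit_vals[::-1]): if b == '1': inner scan over qa_dict
    (bit_vals.reverse.zipIdx).foldl
      (fun acc cb => if cb.1 == '1' then scanStep (cb.2 : Int) acc else acc) []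

-- ===== PORT B =====
def unpack_qa_value_alt (qa_val : Int) : List String :=
  if qa_val == 0 then ["valid pixel in all inputs"]
  else
    -- for pos in range(9): if (q >> pos) % 2: out.append(<label built from pos>)
    -- pos ranges over 0..8 so pos.toNat is exact for the shift
    (PySem.List.pyRange 0 9 1).foldl
      (fun out pos =>
        if PySem.Int.mod (qa_val >>> pos.toNat) 2 != 0 then
          out ++ [if pos == 8 then "Fused t1"
                  else (if pos < 4 then "Prepared" else "Sharpened") ++ " " ++
                       (if PySem.Int.mod pos 4 < 2 then "High" else "Low") ++
                       "-Resolution t" ++ PySem.Int.toStr (PySem.Int.mod pos 2)]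
        else out) []

-- ===== PRECONDITION & SPEC =====
-- On negative qa_val (outside the QA bit-flag domain) A decodes the bits of the sign-stripped
-- magnitude (A(-128) = ['Sharpened Low-Resolution t1']) while B reads the two's-complement bits the
-- way Python's >> defines them (B(-128) adds 'Fused t1') — the standard reading of bits of a
-- negative integer, so B's value is the intended one.
def D_unpack_qa_value (qa_val : Int) : Prop := qa_val < 0
instance (qa_val : Int) : Decidable (D_unpack_qa_value qa_val) := by unfold D_unpack_qa_value; infer_instance

def Spec_unpack_qa_value (qa_val : Int) (out : List String) : Prop := ¬ D_unpack_qa_value qa_val → out = unpack_qa_value_alt qa_val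
instance (qa_val : Int) (out : List String) : Decidable (Spec_unpack_qa_value qa_val out) := by unfold Spec_unpack_qa_value; infer_instance

def pvDiffWitness_unpack_qa_value : Int := -128
def pvDiffWitnessOut_unpack_qa_value : (List String) × (List String) :=
  (["Sharpened Low-Resolution t1"], ["Sharpened Low-Resolution t1", "Fused t1"])

-- ===== CLAIM (what is proved, stated in full; the proofs are below) =====
def Claim_unchanged_unpack_qa_value : Prop := ∀ (qa_val : Int), Dom_unpack_qa_value qa_val → Spec_unpack_qa_value qa_val (unpack_qa_value qa_val)
def Claim_changed_unpack_qa_value : Prop := Dom_unpack_qa_value (pvDiffWitness_unpack_qa_value) ∧ D_unpack_qa_value (pvDiffWitness_unpack_qa_value) ∧ unpack_qa_value (pvDiffWitness_unpack_qa_value) = pvDiffWitnessOut_unpack_qa_value.1 ∧ unpack_qa_value_alt (pvDiffWitness_unpack_qa_value) = pvDiffWitnessOut_unpack_qa_value.2 ∧ pvDiffWitnessOut_unpack_qa_value.1 ≠ pvDiffWitnessOut_unpack_qa_value.2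

-- ===== LEMMAS AND PROOFS =====

-- keys of qa_dict in position order; both results for a non-zero value n reduce to auxB ks n
def ks : List String := qa_dict.map Prod.fst

def auxB : List String → Nat → List String
  | [], _ => []
  | k :: l, n => (if n % 2 = 1 then [k] else []) ++ auxB l (n / 2)

-- the body of A's outer loop
def fA (cb : Char × Nat) : List String := if cb.1 == '1' then scanStep (cb.2 : Int) [] else []

theorem posOf_lit (p : Int) : posOf (PySem.Dict.ofList [("position", p), ("value", 1)]) = p := rfl

theorem auxB_zero (l : List String) : auxB l 0 = [] := by
  induction l with
  | nil => rfl
  | cons k l ih => simp [auxB, ih]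

theorem scan_eq (pos : Int) (acc : List String) :
    scanStep pos acc = acc ++ (qa_dict.filter (fun kv => posOf kv.2 == pos)).map Prod.fst := by
  exact PySem.List.foldl_append_if _ _ _ _

theorem scan_append (pos : Int) (acc : List String) :
    scanStep pos acc = acc ++ scanStep pos [] := by
  rw [scan_eq, scan_eq, List.nil_append]

theorem fold_flat (l : List (Char × Nat)) (acc : List String) :
    l.foldl (fun acc cb => if cb.1 == '1' then scanStep (cb.2 : Int) acc else acc) acc
      = acc ++ l.flatMap fA := by
  induction l generalizing acc with
  | nil => simp
  | cons hd tl ih =>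
    simp only [List.foldl_cons, List.flatMap_cons, ih, fA]
    by_cases h : hd.1 == '1'
    · simp [h, scan_append (hd.2 : Int) acc]
    · simp [h]

theorem zero_bits (m j : Nat) : ((List.replicate m '0').zipIdx j).flatMap fA = [] := by
  induction m generalizing j with
  | zero => rfl
  | succ m ih => simp [List.replicate_succ, List.zipIdx_cons, fA, ih]

theorem keysAt_ge (j : Nat) (h : 9 ≤ j) : scanStep (j : Int) [] = [] := by
  rw [scan_eq, List.nil_append]
  have hf : qa_dict.filter (fun kv => posOf kv.2 == (j : Int)) = [] := by
    rw [List.filter_eq_nil_iff]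
    intro kv hkv
    fin_cases hkv <;> simp [posOf_lit, beq_iff_eq] <;> omega
  rw [hf, List.map_nil]

theorem L1 (n : Nat) : ∀ j, ((natBin n).zipIdx j).flatMap fA = auxB (ks.drop j) n := by
  induction n using Nat.strong_induction_on with
  | _ n ih =>
    intro j
    match n with
    | 0 => simp [natBin, auxB_zero]
    | Nat.succ m =>
      rw [natBin]
      rw [List.zipIdx_cons, List.flatMap_cons,
        ih ((m+1)/2) (Nat.div_lt_self (Nat.succ_pos m) (by omega)) (j+1)]
      by_cases hj : j < 9
      · interval_cases j <;>
          by_cases hb : (m+1) % 2 = 1 <;>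
            simp [hb, fA, auxB, ks, qa_dict, scan_eq, posOf_lit, List.filter]
      · have h9 : 9 ≤ j := by omega
        have hd1 : ks.drop j = [] := List.drop_eq_nil_of_le (by simp [ks, qa_dict]; omega)
        have hd2 : ks.drop (j+1) = [] := List.drop_eq_nil_of_le (by simp [ks, qa_dict]; omega)
        rw [hd1, hd2]
        by_cases hb : (m+1) % 2 = 1 <;> simp [hb, fA, auxB, keysAt_ge j h9]

theorem A_core (n : Nat) (hn : n ≠ 0) :
    unpack_qa_value (n : Int) = auxB ks n := by
  have h0 : ((n : Int) == 0) = false := by simp [hn]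
  have hneg : ¬ ((n : Int) < 0) := by omega
  simp only [unpack_qa_value, h0, Bool.false_eq_true, if_false, hneg, Int.natAbs_natCast]
  rw [List.reverse_append, List.reverse_reverse, List.reverse_replicate,
    List.zipIdx_append, fold_flat, List.flatMap_append, zero_bits, List.append_nil,
    List.nil_append, L1 n 0, List.drop_zero]

-- B's test for bit p of a non-negative value, in arithmetic form
theorem cond_eq (n p : Nat) :
    (PySem.Int.mod ((n : Int) >>> ((p : Nat) : Int)) 2 != 0) = decide (n / 2 ^ p % 2 = 1) := by
  have h1 : (n : Int) >>> ((p : Nat) : Int) = ((n >>> p : Nat) : Int) := by cases p <;> rfl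
  have h2 : ((2 : Int)) = ((2 : Nat) : Int) := by norm_num
  have h3 : ∀ m : Nat, (((m % 2 : Nat) : Int) != 0) = decide (m % 2 = 1) := by
    intro m; rcases Nat.mod_two_eq_zero_or_one m with h | h <;> simp [h]
  rw [h1, h2, PySem.Int.mod_natCast, h3, Nat.shiftRight_eq_div_pow]

theorem filter_map_eq_flatMap {α β : Type} (l : List α) (p : α → Bool) (f : α → β) :
    (l.filter p).map f = l.flatMap (fun x => if p x then [f x] else []) := by
  induction l with
  | nil => rfl
  | cons h t ih => simp only [List.filter_cons, List.flatMap_cons]; split_ifs <;> simp [ih]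

theorem B_core (n : Nat) (hn : n ≠ 0) :
    unpack_qa_value_alt (n : Int) = auxB ks n := by
  have h0 : ((n : Int) == 0) = false := by simp [hn]
  simp only [unpack_qa_value_alt, h0, Bool.false_eq_true, if_false]
  rw [show PySem.List.pyRange 0 9 1 = [0,1,2,3,4,5,6,7,8] from rfl,
    PySem.List.foldl_append_if, filter_map_eq_flatMap, List.nil_append]
  simp only [List.flatMap_cons, List.flatMap_nil, List.append_nil,
    show (0 : Int).toNat = 0 from rfl, show (1 : Int).toNat = 1 from rfl,
    show (2 : Int).toNat = 2 from rfl, show (3 : Int).toNat = 3 from rfl,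
    show (4 : Int).toNat = 4 from rfl, show (5 : Int).toNat = 5 from rfl,
    show (6 : Int).toNat = 6 from rfl, show (7 : Int).toNat = 7 from rfl,
    show (8 : Int).toNat = 8 from rfl]
  simp only [cond_eq]
  have e0 : ("Prepared" ++ " " ++ "High" ++ "-Resolution t" ++ PySem.Int.toStr 0 : String) = "Prepared High-Resolution t0" := by decide
  have e1 : ("Prepared" ++ " " ++ "High" ++ "-Resolution t" ++ PySem.Int.toStr 1 : String) = "Prepared High-Resolution t1" := by decide
  have e2 : ("Prepared" ++ " " ++ "Low" ++ "-Resolution t" ++ PySem.Int.toStr 0 : String) = "Prepared Low-Resolution t0" := by decide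
  have e3 : ("Prepared" ++ " " ++ "Low" ++ "-Resolution t" ++ PySem.Int.toStr 1 : String) = "Prepared Low-Resolution t1" := by decide
  have e4 : ("Sharpened" ++ " " ++ "High" ++ "-Resolution t" ++ PySem.Int.toStr 0 : String) = "Sharpened High-Resolution t0" := by decide
  have e5 : ("Sharpened" ++ " " ++ "High" ++ "-Resolution t" ++ PySem.Int.toStr 1 : String) = "Sharpened High-Resolution t1" := by decide
  have e6 : ("Sharpened" ++ " " ++ "Low" ++ "-Resolution t" ++ PySem.Int.toStr 0 : String) = "Sharpened Low-Resolution t0" := by decide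
  have e7 : ("Sharpened" ++ " " ++ "Low" ++ "-Resolution t" ++ PySem.Int.toStr 1 : String) = "Sharpened Low-Resolution t1" := by decide
  norm_num [e0, e1, e2, e3, e4, e5, e6, e7, auxB, ks, qa_dict, Nat.div_div_eq_div_mul]

-- ===== VERDICT (by name: the statement is the Claim_ definition above) =====
theorem unpack_qa_value_spec : Claim_unchanged_unpack_qa_value := by
  intro qa_val _ hnd
  have hpre : 0 ≤ qa_val := by unfold D_unpack_qa_value at hnd; omega
  by_cases h0 : qa_val = 0
  · simp [unpack_qa_value, unpack_qa_value_alt, h0]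
  · have hq : qa_val = ((qa_val.toNat : Nat) : Int) := (Int.toNat_of_nonneg hpre).symm
    have hn : qa_val.toNat ≠ 0 := by omega
    rw [hq, A_core _ hn, B_core _ hn]

theorem unpack_qa_value_changed : Claim_changed_unpack_qa_value := by
  unfold Claim_changed_unpack_qa_value
  have h : natBin 128 = ['0','0','0','0','0','0','0','1'] := by norm_num [natBin]
  refine ⟨by decide, by decide, ?_, ?_, by decide⟩
  · show unpack_qa_value (-128) = ["Sharpened Low-Resolution t1"]
    simp only [unpack_qa_value]
    rw [show ((-128 : Int).natAbs) = 128 from rfl, h]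
    decide
  · decide
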